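-- pv_equiv track=rewrite | github.com/pandemonium0225/music-prompt-generator | backend/translator.py | _detect_and_resolve_conflicts
-- ===== SOURCE A (Python) =====
-- SEMANTIC_CONFLICTS = {
--     "energy": {
--         "high": ["upbeat", "energetic", "powerful", "intense", "driving", "dynamic", "anthemic", "explosive"],
--         "low": ["ambient", "minimalist", "soft", "gentle", "relaxed", "calm", "ethereal", "peaceful"]
--     },
--     "tempo": {
--         "fast": ["fast-paced", "frenetic", "high energy", "driving beat", "upbeat"],
--         "slow": ["slow burn", "downtempo", "ballad", "contemplative", "laid back"]
--     },
--     "production": {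
--         "clean": ["polished", "crisp", "high fidelity", "clean mix", "modern"],
--         "raw": ["lo-fi", "vintage", "distorted", "compressed", "warm", "analog"]
--     },
--     "mood": {
--         "positive": ["uplifting", "happy", "bright mood", "hopeful", "playful"],
--         "negative": ["melancholic", "dark", "sad", "lonely", "anxious"]
--     }
-- }
--
-- def _detect_and_resolve_conflicts(tag_list: list) -> list:
--     """
--     檢測語義衝突，同一維度只保留第一個出現的
--
--     例如: ["energetic", "ambient"] -> ["energetic"] (不保留 ambient)
--     """
--     result = []
--     locked_dimensions = {}  # dimension -> "high" or "low"
--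
--     for tag in tag_list:
--         tag_lower = tag.lower()
--         has_conflict = False
--
--         # 檢查所有衝突維度
--         for dimension, levels in SEMANTIC_CONFLICTS.items():
--             for level, level_tags in levels.items():
--                 level_tags_lower = [t.lower() for t in level_tags]
--
--                 if tag_lower in level_tags_lower:
--                     # 該標籤屬於某個維度的某個等級
--                     if dimension in locked_dimensions:
--                         # 該維度已被鎖定
--                         if locked_dimensions[dimension] != level:
--                             # 衝突! 這個標籤與已選標籤衝突
--                             has_conflict = True
--                             break
--                     else:
--                         # 鎖定該維度
--                         locked_dimensions[dimension] = level
--                     break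
--
--             if has_conflict:
--                 break
--
--         if not has_conflict and tag not in result:
--             result.append(tag)
--
--     return result
-- ===== SOURCE B (Python) =====
-- SEMANTIC_CONFLICTS = {
--     "energy": {
--         "high": ["upbeat", "energetic", "powerful", "intense", "driving", "dynamic", "anthemic", "explosive"],
--         "low": ["ambient", "minimalist", "soft", "gentle", "relaxed", "calm", "ethereal", "peaceful"]
--     },
--     "tempo": {
--         "fast": ["fast-paced", "frenetic", "high energy", "driving beat", "upbeat"],
--         "slow": ["slow burn", "downtempo", "ballad", "contemplative", "laid back"]
--     },
--     "production": {
--         "clean": ["polished", "crisp", "high fidelity", "clean mix", "modern"],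
--         "raw": ["lo-fi", "vintage", "distorted", "compressed", "warm", "analog"]
--     },
--     "mood": {
--         "positive": ["uplifting", "happy", "bright mood", "hopeful", "playful"],
--         "negative": ["melancholic", "dark", "sad", "lonely", "anxious"]
--     }
-- }
--
-- # Inverted index: lowercased tag -> ordered list of (dimension, first level containing it).
-- _TAG_INDEX = {}
-- for _dim, _levels in SEMANTIC_CONFLICTS.items():
--     for _level, _tags in _levels.items():
--         for _t in _tags:
--             _tl = _t.lower()
--             _entries = _TAG_INDEX.setdefault(_tl, [])
--             if all(d != _dim for d, _ in _entries):
--                 _entries.append((_dim, _level))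
--
--
-- def _detect_and_resolve_conflicts(tag_list: list) -> list:
--     result = []
--     locked = {}
--     for tag in tag_list:
--         conflict = False
--         for dim, level in _TAG_INDEX.get(tag.lower(), ()):
--             prev = locked.get(dim)
--             if prev is None:
--                 locked[dim] = level
--             elif prev != level:
--                 conflict = True
--                 break
--         if not conflict and tag not in result:
--             result.append(tag)
--     return result
-- ===== Notes on version B (the rewrite author's own statement) =====
-- stated objective: alternative
-- what changed: B precomputes an inverted index mapping each lowercased tag to its (dimension, level) memberships once, so the per-tag nested rescans of the whole SEMANTIC_CONFLICTS table are replaced by a single dict lookup per tag.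
import Mathlib
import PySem

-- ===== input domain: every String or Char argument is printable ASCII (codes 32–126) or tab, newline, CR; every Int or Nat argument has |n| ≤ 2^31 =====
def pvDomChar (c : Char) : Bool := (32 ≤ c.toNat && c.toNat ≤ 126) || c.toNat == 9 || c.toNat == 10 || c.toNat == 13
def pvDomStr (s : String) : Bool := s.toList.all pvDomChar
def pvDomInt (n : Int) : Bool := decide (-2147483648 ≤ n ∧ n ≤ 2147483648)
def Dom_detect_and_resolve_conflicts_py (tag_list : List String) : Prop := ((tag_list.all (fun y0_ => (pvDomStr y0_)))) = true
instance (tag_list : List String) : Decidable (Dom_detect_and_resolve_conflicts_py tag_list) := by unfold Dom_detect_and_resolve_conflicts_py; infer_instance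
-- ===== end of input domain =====

-- B replaces A's per-tag rescan of the whole SEMANTIC_CONFLICTS table by an inverted
-- index (lowercased tag -> its (dimension, level) memberships) built once, so the per-tag
-- table work becomes a single dictionary lookup; same return value (objective: alternative).

-- ===== PORT A =====
-- SEMANTIC_CONFLICTS (a dict of dicts, only iterated) as an association list
def pyTable : List (String × List (String × List String)) :=
  [("energy", [("high", ["upbeat", "energetic", "powerful", "intense", "driving", "dynamic", "anthemic", "explosive"]), ("low", ["ambient", "minimalist", "soft", "gentle", "relaxed", "calm", "ethereal", "peaceful"])]),
   ("tempo", [("fast", ["fast-paced", "frenetic", "high energy", "driving beat", "upbeat"]), ("slow", ["slow burn", "downtempo", "ballad", "contemplative", "laid back"])]),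
   ("production", [("clean", ["polished", "crisp", "high fidelity", "clean mix", "modern"]), ("raw", ["lo-fi", "vintage", "distorted", "compressed", "warm", "analog"])]),
   ("mood", [("positive", ["uplifting", "happy", "bright mood", "hopeful", "playful"]), ("negative", ["melancholic", "dark", "sad", "lonely", "anxious"])])]

-- inner 'for level, level_tags in levels.items(): … break' (break at first level containing tag_lower)
def findLevelA (tl : String) : List (String × List String) → Option String
  | [] => none
  | (level, tags) :: rest =>
    if tl ∈ tags.map PySem.Str.lower then some level else findLevelA tl rest

-- 'for dimension, levels in SEMANTIC_CONFLICTS.items(): … if has_conflict: break'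
-- returns (locked_dimensions, has_conflict)
def scanDimsA (tl : String) : List (String × List (String × List String)) →
    PySem.Dict String String → PySem.Dict String String × Bool
  | [], locked => (locked, false)
  | (dim, levels) :: rest, locked =>
    match findLevelA tl levels with
    | none => scanDimsA tl rest locked
    | some level =>
      match locked.get? dim with
      | some l => if l ≠ level then (locked, true) else scanDimsA tl rest locked
      | none => scanDimsA tl rest (locked.insert dim level)

def detect_and_resolve_conflicts_py (tag_list : List String) : List String :=
  (tag_list.foldl (fun st tag =>
      let tl := PySem.Str.lower tag
      let r := scanDimsA tl pyTable st.2
      (if r.2 = false ∧ tag ∉ st.1 then st.1 ++ [tag] else st.1, r.1))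
    (([] : List String), (PySem.Dict.empty : PySem.Dict String String))).1

-- ===== PORT B =====
-- _TAG_INDEX: built once from the table (setdefault + append-if-dimension-new)
def pyIndex : PySem.Dict String (List (String × String)) :=
  pyTable.foldl (fun ix p =>
    p.2.foldl (fun ix q =>
      q.2.foldl (fun ix t =>
        let tl := PySem.Str.lower t
        let ix' := ix.setdefault tl []
        let entries := ix'.getD tl []
        if entries.all (fun e => e.1 ≠ p.1) then ix'.insert tl (entries ++ [(p.1, q.1)]) else ix')
        ix) ix)
    PySem.Dict.empty

-- 'for dim, level in _TAG_INDEX.get(tag.lower(), ()): …' with break on conflict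
def applyMatchesB : List (String × String) → PySem.Dict String String → PySem.Dict String String × Bool
  | [], locked => (locked, false)
  | (dim, level) :: rest, locked =>
    match locked.get? dim with
    | none => applyMatchesB rest (locked.insert dim level)
    | some prev => if prev ≠ level then (locked, true) else applyMatchesB rest locked

def detect_and_resolve_conflicts_py_alt (tag_list : List String) : List String :=
  (tag_list.foldl (fun st tag =>
      let r := applyMatchesB (pyIndex.getD (PySem.Str.lower tag) []) st.2
      (if r.2 = false ∧ tag ∉ st.1 then st.1 ++ [tag] else st.1, r.1))
    (([] : List String), (PySem.Dict.empty : PySem.Dict String String))).1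

-- ===== PRECONDITION & SPEC =====
def Spec_detect_and_resolve_conflicts_py (tag_list : List String) (out : List String) : Prop := out = detect_and_resolve_conflicts_py_alt tag_list
instance (tag_list : List String) (out : List String) : Decidable (Spec_detect_and_resolve_conflicts_py tag_list out) := by unfold Spec_detect_and_resolve_conflicts_py; infer_instance

-- ===== CLAIM (what is proved, stated in full; the proofs are below) =====
def Claim_equal_detect_and_resolve_conflicts_py : Prop := ∀ (tag_list : List String), Dom_detect_and_resolve_conflicts_py tag_list → Spec_detect_and_resolve_conflicts_py tag_list (detect_and_resolve_conflicts_py tag_list)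

-- ===== LEMMAS AND PROOFS =====

-- the (dimension, level) memberships of tl, in A's traversal order
def matchesOf (tl : String) (dims : List (String × List (String × List String))) :
    List (String × String) :=
  dims.filterMap (fun p => (findLevelA tl p.2).map (fun lv => (p.1, lv)))

-- all lowercased tags occurring in the table, in first-occurrence order (= pyIndex.keys)
def allKeys : List String :=
  ["upbeat", "energetic", "powerful", "intense", "driving", "dynamic", "anthemic", "explosive", "ambient", "minimalist", "soft", "gentle", "relaxed", "calm", "ethereal", "peaceful", "fast-paced", "frenetic", "high energy", "driving beat", "slow burn", "downtempo", "ballad", "contemplative", "laid back", "polished", "crisp", "high fidelity", "clean mix", "modern", "lo-fi", "vintage", "distorted", "compressed", "warm", "analog", "uplifting", "happy", "bright mood", "hopeful", "playful", "melancholic", "dark", "sad", "lonely", "anxious"]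

set_option maxRecDepth 100000 in
lemma keys_pyIndex : pyIndex.keys = allKeys := by decide

lemma scan_eq (tl : String) (dims : List (String × List (String × List String)))
    (locked : PySem.Dict String String) :
    scanDimsA tl dims locked = applyMatchesB (matchesOf tl dims) locked := by
  induction dims generalizing locked with
  | nil => rfl
  | cons hd rest ih =>
    obtain ⟨dim, levels⟩ := hd
    simp only [scanDimsA, matchesOf, List.filterMap_cons]
    cases h : findLevelA tl levels with
    | none => simpa [matchesOf] using ih locked
    | some level =>
      simp only [Option.map_some]
      show _ = applyMatchesB ((dim, level) :: _) locked
      cases hg : locked.get? dim with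
      | none => simpa [applyMatchesB, hg, matchesOf] using ih (locked.insert dim level)
      | some prev =>
        by_cases hne : prev ≠ level
        · simp [applyMatchesB, hg, hne]
        · simpa [applyMatchesB, hg, hne, matchesOf] using ih locked

set_option maxRecDepth 100000 in
lemma matches_eq (tl : String) : matchesOf tl pyTable = pyIndex.getD tl [] := by
  by_cases hmem : tl ∈ allKeys
  · fin_cases hmem <;> decide
  · have hc : pyIndex.contains tl = false := by
      rw [PySem.Dict.contains_eq_decide_mem_keys, keys_pyIndex]
      simp [hmem]
    rw [PySem.Dict.getD_of_not_contains _ _ hc]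
    have h2 := hmem
    simp only [allKeys, List.mem_cons, List.not_mem_nil, or_false] at h2
    push Not at h2
    have hl : ∀ s ∈ allKeys, PySem.Str.lower s = s := by decide
    simp [matchesOf, findLevelA, pyTable, allKeys, List.mem_cons, hl, h2]

lemma step_eq (st : List String × PySem.Dict String String) (tag : String) :
    (let tl := PySem.Str.lower tag
     let r := scanDimsA tl pyTable st.2
     (if r.2 = false ∧ tag ∉ st.1 then st.1 ++ [tag] else st.1, r.1)) =
    (let r := applyMatchesB (pyIndex.getD (PySem.Str.lower tag) []) st.2
     (if r.2 = false ∧ tag ∉ st.1 then st.1 ++ [tag] else st.1, r.1)) := by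
  simp only [scan_eq, matches_eq]

-- ===== VERDICT (by name: the statement is the Claim_ definition above) =====
set_option maxRecDepth 100000 in
theorem detect_and_resolve_conflicts_py_spec : Claim_equal_detect_and_resolve_conflicts_py := by
  intro tag_list _
  unfold Spec_detect_and_resolve_conflicts_py
  unfold detect_and_resolve_conflicts_py detect_and_resolve_conflicts_py_alt
  congr 1
  exact List.foldl_ext _ _ _ (fun st tag _ => step_eq st tag)
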